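-- pv_equiv track=rewrite | github.com/MaraSchulze/AdventOfCode-2015-Python | puzzles/day11.1.py | requirement2
-- ===== SOURCE A (Python) =====
-- def requirement2(password):
--     nr_pairs = 0
--     i = 0
--     while i < len(password) - 1:
--         if password[i] == password[i + 1]:
--             nr_pairs += 1
--             i += 1
--         i += 1
--     return nr_pairs >= 2
-- ===== SOURCE B (Python) =====
-- def requirement2(password):
--     # Run-length encode the password, then count floor(L/2) non-overlapping
--     # pairs inside each maximal run of equal characters and sum them.
--     runs = []
--     for c in password:
--         if runs and runs[-1][0] == c:
--             runs[-1][1] += 1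
--         else:
--             runs.append([c, 1])
--     return sum(n // 2 for _, n in runs) >= 2
-- ===== Notes on version B (the rewrite author's own statement) =====
-- stated objective: alternative
-- what changed: Instead of a skip-ahead index loop counting pairs, B run-length encodes the string and sums floor(L/2) over the maximal runs, using the arithmetic fact that a run of length L holds exactly floor(L/2) non-overlapping pairs.
import Mathlib
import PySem

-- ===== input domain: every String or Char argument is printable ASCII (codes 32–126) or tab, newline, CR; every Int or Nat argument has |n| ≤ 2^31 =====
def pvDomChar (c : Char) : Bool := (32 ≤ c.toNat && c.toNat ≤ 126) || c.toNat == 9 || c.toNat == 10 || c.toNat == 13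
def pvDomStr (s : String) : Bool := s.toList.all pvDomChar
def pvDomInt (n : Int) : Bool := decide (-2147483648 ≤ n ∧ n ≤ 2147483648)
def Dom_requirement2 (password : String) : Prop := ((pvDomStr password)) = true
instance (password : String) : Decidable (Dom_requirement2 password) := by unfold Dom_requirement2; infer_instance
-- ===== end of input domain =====

-- B replaces A's skip-ahead index loop by run-length encoding plus the per-run floor(L/2) pair formula (alternative decomposition, same cost).


-- ===== PORT A =====
-- A's while loop: index i, counter nr_pairs; on a pair i advances by 2, else by 1.
def reqLoopA (cs : List Char) (nr i : Nat) : Nat :=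
  if h : i + 1 < cs.length then
    if cs[i]'(by omega) = cs[i + 1]'h then reqLoopA cs (nr + 1) (i + 2)
    else reqLoopA cs nr (i + 1)
  else nr
termination_by cs.length - i

def requirement2 (password : String) : Bool :=
  decide (2 ≤ reqLoopA password.toList 0 0)

-- ===== PORT B =====
-- B's loop body: extend the last run if its char matches, else start a new run.
def pushRun (runs : List (Char × Nat)) (c : Char) : List (Char × Nat) :=
  match runs.getLast? with
  | some (c', n) => if c' = c then runs.dropLast ++ [(c', n + 1)] else runs ++ [(c, 1)]
  | none => runs ++ [(c, 1)]

def requirement2_alt (password : String) : Bool :=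
  decide (2 ≤ (((password.toList.foldl pushRun []).map (fun p => p.2 / 2)).sum))

-- ===== PRECONDITION & SPEC =====
def Spec_requirement2 (password : String) (out : Bool) : Prop := out = requirement2_alt password
instance (password : String) (out : Bool) : Decidable (Spec_requirement2 password out) := by unfold Spec_requirement2; infer_instance

-- ===== CLAIM (what is proved, stated in full; the proofs are below) =====
def Claim_equal_requirement2 : Prop := ∀ (password : String), Dom_requirement2 password → Spec_requirement2 password (requirement2 password)

-- ===== LEMMAS AND PROOFS =====

-- proof-side skip-pair counter (A's recursion in structural form)
def pairsSkip : List Char → Nat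
  | a :: b :: rest => if a = b then 1 + pairsSkip rest else pairsSkip (b :: rest)
  | _ => 0
termination_by l => l.length

-- proof-side run counter: currently inside a run of char c seen n times
def cnt (c : Char) (n : Nat) : List Char → Nat
  | [] => n / 2
  | x :: rest => if x = c then cnt c (n + 1) rest else n / 2 + cnt x 1 rest

def cntAll : List Char → Nat
  | [] => 0
  | x :: rest => cnt x 1 rest

theorem pairsSkip_short (l : List Char) (h : l.length ≤ 1) : pairsSkip l = 0 := by
  match l, h with
  | [], _ => simp [pairsSkip]
  | [a], _ => simp [pairsSkip]

theorem reqLoopA_eq (cs : List Char) (i nr : Nat) :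
    reqLoopA cs nr i = nr + pairsSkip (cs.drop i) := by
  rw [reqLoopA]
  split
  · next h =>
    have hd : cs.drop i = cs[i]'(by omega) :: cs[i+1]'h :: cs.drop (i + 2) := by
      rw [List.drop_eq_getElem_cons (by omega), List.drop_eq_getElem_cons h]
    rw [hd, pairsSkip]
    split
    · next heq =>
      rw [reqLoopA_eq cs (i + 2) (nr + 1)]
      omega
    · next hne =>
      rw [← List.drop_eq_getElem_cons h, reqLoopA_eq cs (i + 1) nr]
  · next h =>
    rw [pairsSkip_short _ (by simp; omega)]; omega
termination_by cs.length - i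

theorem cnt_add_two (cs : List Char) (c : Char) (n : Nat) :
    cnt c (n + 2) cs = 1 + cnt c n cs := by
  induction cs generalizing n with
  | nil => simp [cnt]; omega
  | cons x rest ih =>
    simp only [cnt]
    split
    · exact ih (n + 1)
    · omega

theorem cnt_zero (cs : List Char) (c : Char) : cnt c 0 cs = cntAll cs := by
  cases cs with
  | nil => simp [cnt, cntAll]
  | cons x rest =>
    simp only [cnt, cntAll]
    split
    · next h => subst h; rfl
    · simp

theorem pairsSkip_eq_cntAll (cs : List Char) : pairsSkip cs = cntAll cs := by
  match cs with
  | [] => simp [pairsSkip, cntAll]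
  | [a] => simp [pairsSkip, cntAll, cnt]
  | a :: b :: rest =>
    rw [pairsSkip]
    by_cases h : a = b
    · subst h
      rw [if_pos rfl, pairsSkip_eq_cntAll rest]
      show _ = cnt a 1 (a :: rest)
      rw [cnt, if_pos rfl, show (1 : Nat) + 1 = 0 + 2 from rfl, cnt_add_two, cnt_zero]
    · rw [if_neg h, pairsSkip_eq_cntAll (b :: rest)]
      show cntAll (b :: rest) = cnt a 1 (b :: rest)
      rw [cnt, if_neg (fun hba => h hba.symm)]
      simp [cntAll]
termination_by cs.length

-- the B fold, with the last run (c, n) split off, computes cnt c n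
theorem foldl_pushRun_sum (cs : List Char) (acc : List (Char × Nat)) (c : Char) (n : Nat) :
    (((cs.foldl pushRun (acc ++ [(c, n)])).map (fun p => p.2 / 2)).sum) =
      ((acc.map (fun p => p.2 / 2)).sum) + cnt c n cs := by
  induction cs generalizing acc c n with
  | nil => simp [cnt]
  | cons x rest ih =>
    simp only [List.foldl_cons, pushRun, List.getLast?_concat, List.dropLast_concat]
    split
    · next h =>
      rw [ih acc c (n + 1)]
      simp only [cnt, if_pos h.symm]
    · next h =>
      rw [show acc ++ [(c, n)] ++ [(x, 1)] = (acc ++ [(c, n)]) ++ [(x, 1)] from rfl]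
      rw [ih (acc ++ [(c, n)]) x 1]
      simp only [cnt]
      rw [if_neg (fun hxc => h hxc.symm)]
      simp
      omega

-- ===== VERDICT (by name: the statement is the Claim_ definition above) =====
theorem requirement2_spec : Claim_equal_requirement2 := by
  intro p _
  unfold Spec_requirement2 requirement2 requirement2_alt
  rw [reqLoopA_eq p.toList 0 0, pairsSkip_eq_cntAll]
  cases h : p.toList with
  | nil => simp [cntAll]
  | cons x rest =>
    have key : (((x :: rest).foldl pushRun []).map (fun p => p.2 / 2)).sum = cnt x 1 rest := by
      simp only [List.foldl_cons, pushRun, List.getLast?_nil, List.nil_append]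
      rw [show ([(x, 1)] : List (Char × Nat)) = [] ++ [(x, 1)] from rfl,
          foldl_pushRun_sum rest [] x 1]
      simp
    simp only [key]
    simp [cntAll]
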